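-- pv_equiv track=rewrite | github.com/suvinbrettleeroy/PathuGuide-AI | Code/app.py | calculate_exam_success_rate
-- ===== SOURCE A (Python) =====
-- def calculate_exam_success_rate(data):
--     """Calculate success prediction for government exam based on user inputs"""
--     total_score = 0
--     breakdown = {
--         'education': 0,
--         'commitment': 0,
--         'timeline': 0,
--         'competition': 0
--     }
--
--     # Factor 1: Educational Qualification (0-25 points)
--     qualification = data.get('qualification', '')
--     exam_type = data.get('exam_type', '')
--
--     # Match qualification to exam requirements
--     ug_degrees = ['B.E', 'B.Tech', 'B.Sc', 'B.Com', 'B.A', 'BBA', 'BCA']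
--     pg_degrees = ['M.E', 'M.Tech', 'M.Sc', 'M.Com', 'M.A', 'MBA', 'MCA']
--
--     if any(deg in qualification for deg in pg_degrees):
--         breakdown['education'] = 25  # PG qualification
--     elif any(deg in qualification for deg in ug_degrees):
--         breakdown['education'] = 22  # UG qualification
--     else:
--         breakdown['education'] = 18
--
--     # Factor 2: Study Commitment (0-30 points)
--     study_hours = data.get('study_hours', '4-6')
--     try:
--         if '-' in study_hours:
--             avg_hours = sum(map(int, study_hours.split('-'))) / 2
--         else:
--             avg_hours = int(study_hours.split()[0]) if study_hours else 4
--
--         if avg_hours >= 10: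
--             breakdown['commitment'] = 30
--         elif avg_hours >= 8:
--             breakdown['commitment'] = 28
--         elif avg_hours >= 6:
--             breakdown['commitment'] = 25
--         elif avg_hours >= 4:
--             breakdown['commitment'] = 20
--         else:
--             breakdown['commitment'] = 15
--     except:
--         breakdown['commitment'] = 22
--
--     # Factor 3: Preparation Duration (0-25 points)
--     duration = data.get('preparation_duration', '6-12')
--     try:
--         if '-' in duration:
--             avg_months = sum(map(int, duration.split('-'))) / 2
--         else:
--             avg_months = int(duration.split()[0]) if duration else 6
--
--         if avg_months >= 12:
--             breakdown['timeline'] = 25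
--         elif avg_months >= 8:
--             breakdown['timeline'] = 23
--         elif avg_months >= 6:
--             breakdown['timeline'] = 20
--         elif avg_months >= 3:
--             breakdown['timeline'] = 16
--         else:
--             breakdown['timeline'] = 12
--     except:
--         breakdown['timeline'] = 20
--
--     # Factor 4: Competition Level (0-20 points) - Based on exam difficulty
--     group1_exams = ['Group I', 'Group IA', 'IAS', 'IPS']
--     group2_exams = ['Group II', 'Group IIA', 'TNPSC']
--
--     if any(g1 in exam_type for g1 in group1_exams):
--         breakdown['competition'] = 15  # Highly competitive
--     elif any(g2 in exam_type for g2 in group2_exams):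
--         breakdown['competition'] = 18  # Moderately competitive
--     else:
--         breakdown['competition'] = 17
--
--     total_score = sum(breakdown.values())
--
--     return {
--         'total': total_score,
--         'education': breakdown['education'],
--         'commitment': breakdown['commitment'],
--         'timeline': breakdown['timeline'],
--         'competition': breakdown['competition']
--     }
-- ===== SOURCE B (Python) =====
-- # Different decomposition: each numeric factor is scored by ACCUMULATING band
-- # increments (base + sum of bonuses whose threshold the average meets) instead
-- # of an if/elif ladder, the two keyword factors become boolean arithmetic, and
-- # one shared helper does the parse + try/except that A writes out twice.
--
-- def _avg(s, default):
--     """The average s encodes: mean of the '-'-separated integers, the bare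
--     leading integer, or the default for an empty string."""
--     if '-' in s:
--         return sum(map(int, s.split('-'))) / 2
--     return int(s.split()[0]) if s else default
--
-- def _graded(value, default, base, steps, fallback):
--     """base plus every increment whose threshold the average meets;
--     a failing parse yields the fallback."""
--     try:
--         avg = _avg(value, default)
--     except Exception:
--         return fallback
--     return base + sum(pts for t, pts in steps if avg >= t)
--
-- def calculate_exam_success_rate(data):
--     """Calculate success prediction for government exam based on user inputs"""
--     q = data.get('qualification', '')
--     e = data.get('exam_type', '')
--     pg = any(w in q for w in ['M.E', 'M.Tech', 'M.Sc', 'M.Com', 'M.A', 'MBA', 'MCA'])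
--     ug = any(w in q for w in ['B.E', 'B.Tech', 'B.Sc', 'B.Com', 'B.A', 'BBA', 'BCA'])
--     g1 = any(w in e for w in ['Group I', 'Group IA', 'IAS', 'IPS'])
--     g2 = any(w in e for w in ['Group II', 'Group IIA', 'TNPSC'])
--     education = 18 + 4 * (ug or pg) + 3 * pg
--     competition = 17 - 2 * g1 + (g2 and not g1)
--     commitment = _graded(data.get('study_hours', '4-6'), 4, 15,
--                          [(4, 5), (6, 5), (8, 3), (10, 2)], 22)
--     timeline = _graded(data.get('preparation_duration', '6-12'), 6, 12,
--                        [(3, 4), (6, 4), (8, 3), (12, 2)], 20)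
--     return {'total': education + commitment + timeline + competition,
--             'education': education, 'commitment': commitment,
--             'timeline': timeline, 'competition': competition}
-- ===== Notes on version B (the rewrite author's own statement) =====
-- stated objective: alternative
-- what changed: Each numeric factor is scored by accumulating band increments (base plus the sum of bonuses whose threshold the average meets) instead of a first-match if/elif ladder, the two keyword factors become boolean arithmetic on membership flags, and one shared helper performs the parse and try/except that A writes out twice.
import Mathlib
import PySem

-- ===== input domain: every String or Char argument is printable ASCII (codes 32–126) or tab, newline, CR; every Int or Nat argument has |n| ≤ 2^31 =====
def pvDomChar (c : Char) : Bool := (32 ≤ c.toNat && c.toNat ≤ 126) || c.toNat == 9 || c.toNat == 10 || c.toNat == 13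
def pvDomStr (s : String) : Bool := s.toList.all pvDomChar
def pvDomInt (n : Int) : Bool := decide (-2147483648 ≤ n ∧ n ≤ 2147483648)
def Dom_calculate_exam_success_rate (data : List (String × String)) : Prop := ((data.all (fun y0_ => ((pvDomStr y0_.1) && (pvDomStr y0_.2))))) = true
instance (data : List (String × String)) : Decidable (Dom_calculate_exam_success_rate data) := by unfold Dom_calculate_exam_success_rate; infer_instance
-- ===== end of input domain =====

-- B scores each numeric factor by accumulating band increments instead of an
-- if/elif ladder, turns the two keyword factors into boolean arithmetic, and
-- shares one parse+fallback helper; same return value on every input.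

-- ===== PORT A =====
-- Exact model of Python's `sum/2` float true division here: it raises
-- OverflowError (none) when |n| ≥ 2^1025 - 2^971, and otherwise the band
-- comparisons against the small integer thresholds behave exactly like the
-- exact rational n/2 (the rounding of n/2 to a float cannot cross them).
def pvHalf? (n : Int) : Option ℚ :=
  if n ≥ 2 ^ 1025 - 2 ^ 971 ∨ n ≤ -(2 ^ 1025 - 2 ^ 971) then none
  else some ((n : ℚ) / 2)

def pvAvgHours? (s : String) : Option ℚ :=
  if PySem.Str.isIn "-" s then
    (((PySem.Str.split? s "-").getD []).mapM PySem.Int.ofStr?).bind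
      (fun ns => pvHalf? ns.sum)
  else if s ≠ "" then
    (PySem.List.pyGet? (PySem.Str.split₀ s) 0).bind
      (fun w => (PySem.Int.ofStr? w).map (fun n => (n : ℚ)))
  else some 4  -- the 'if study_hours else 4' arm; duration uses pvAvgMonths?

def pvAvgMonths? (s : String) : Option ℚ :=
  if PySem.Str.isIn "-" s then
    (((PySem.Str.split? s "-").getD []).mapM PySem.Int.ofStr?).bind
      (fun ns => pvHalf? ns.sum)
  else if s ≠ "" then
    (PySem.List.pyGet? (PySem.Str.split₀ s) 0).bind
      (fun w => (PySem.Int.ofStr? w).map (fun n => (n : ℚ)))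
  else some 6

def calculate_exam_success_rate (data : List (String × String)) : List (String × Int) :=
  let d := PySem.Dict.ofList data
  let qualification := d.getD "qualification" ""
  let exam_type := d.getD "exam_type" ""
  let ug_degrees := ["B.E", "B.Tech", "B.Sc", "B.Com", "B.A", "BBA", "BCA"]
  let pg_degrees := ["M.E", "M.Tech", "M.Sc", "M.Com", "M.A", "MBA", "MCA"]
  let education : Int :=
    if pg_degrees.any (fun deg => PySem.Str.isIn deg qualification) then 25
    else if ug_degrees.any (fun deg => PySem.Str.isIn deg qualification) then 22
    else 18
  let study_hours := d.getD "study_hours" "4-6"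
  let commitment : Int :=
    match pvAvgHours? study_hours with
    | none => 22  -- the bare 'except:' arm
    | some avg =>
      if avg ≥ 10 then 30 else if avg ≥ 8 then 28
      else if avg ≥ 6 then 25 else if avg ≥ 4 then 20 else 15
  let duration := d.getD "preparation_duration" "6-12"
  let timeline : Int :=
    match pvAvgMonths? duration with
    | none => 20
    | some avg =>
      if avg ≥ 12 then 25 else if avg ≥ 8 then 23
      else if avg ≥ 6 then 20 else if avg ≥ 3 then 16 else 12
  let group1_exams := ["Group I", "Group IA", "IAS", "IPS"]
  let group2_exams := ["Group II", "Group IIA", "TNPSC"]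
  let competition : Int :=
    if group1_exams.any (fun g1 => PySem.Str.isIn g1 exam_type) then 15
    else if group2_exams.any (fun g2 => PySem.Str.isIn g2 exam_type) then 18
    else 17
  let total_score := education + commitment + timeline + competition
  [("total", total_score), ("education", education), ("commitment", commitment),
   ("timeline", timeline), ("competition", competition)]

-- ===== PORT B =====
-- _avg: the same Python float `sum/2` is modelled by pvHalf? (exact here).
def pvAvg? (s : String) (dflt : Int) : Option ℚ :=
  if PySem.Str.isIn "-" s then
    (((PySem.Str.split? s "-").getD []).mapM PySem.Int.ofStr?).bind
      (fun ns => pvHalf? ns.sum)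
  else if s = "" then some (dflt : ℚ)
  else (((PySem.List.pyGet? (PySem.Str.split₀ s) 0).bind PySem.Int.ofStr?).map
      (fun n => (n : ℚ)))

-- _graded: base plus every increment whose threshold the average meets
def pvGraded (value : String) (dflt base : Int) (steps : List (Int × Int))
    (fallback : Int) : Int :=
  match pvAvg? value dflt with
  | none => fallback
  | some avg =>
    base + steps.foldl (fun acc tp => if avg ≥ (tp.1 : ℚ) then acc + tp.2 else acc) 0

def pvHas (field : String) (words : List String) : Bool :=
  words.any (fun w => PySem.Str.isIn w field)

def pvB2I (b : Bool) : Int := if b then 1 else 0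

def calculate_exam_success_rate_alt (data : List (String × String)) : List (String × Int) :=
  let d := PySem.Dict.ofList data
  let q := d.getD "qualification" ""
  let e := d.getD "exam_type" ""
  let pg := pvHas q ["M.E", "M.Tech", "M.Sc", "M.Com", "M.A", "MBA", "MCA"]
  let ug := pvHas q ["B.E", "B.Tech", "B.Sc", "B.Com", "B.A", "BBA", "BCA"]
  let g1 := pvHas e ["Group I", "Group IA", "IAS", "IPS"]
  let g2 := pvHas e ["Group II", "Group IIA", "TNPSC"]
  let education : Int := 18 + 4 * pvB2I (ug || pg) + 3 * pvB2I pg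
  let competition : Int := 17 - 2 * pvB2I g1 + pvB2I (g2 && !g1)
  let commitment := pvGraded (d.getD "study_hours" "4-6") 4 15
    [(4, 5), (6, 5), (8, 3), (10, 2)] 22
  let timeline := pvGraded (d.getD "preparation_duration" "6-12") 6 12
    [(3, 4), (6, 4), (8, 3), (12, 2)] 20
  [("total", education + commitment + timeline + competition),
   ("education", education), ("commitment", commitment),
   ("timeline", timeline), ("competition", competition)]

-- ===== PRECONDITION & SPEC =====
def Spec_calculate_exam_success_rate (data : List (String × String)) (out : List (String × Int)) : Prop := out = calculate_exam_success_rate_alt data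
instance (data : List (String × String)) (out : List (String × Int)) : Decidable (Spec_calculate_exam_success_rate data out) := by unfold Spec_calculate_exam_success_rate; infer_instance

-- ===== CLAIM =====
def Claim_equal_calculate_exam_success_rate : Prop := ∀ (data : List (String × String)), Dom_calculate_exam_success_rate data → Spec_calculate_exam_success_rate data (calculate_exam_success_rate data)

-- ===== LEMMAS AND PROOFS =====
lemma pv_avg_hours (s : String) : pvAvgHours? s = pvAvg? s 4 := by
  unfold pvAvgHours? pvAvg?
  simp [ne_eq, ite_not, Option.bind_assoc]

lemma pv_avg_months (s : String) : pvAvgMonths? s = pvAvg? s 6 := by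
  unfold pvAvgMonths? pvAvg?
  simp [ne_eq, ite_not, Option.bind_assoc]

lemma pv_commit_band (q : ℚ) :
    (if q ≥ 10 then (30 : Int) else if q ≥ 8 then 28
     else if q ≥ 6 then 25 else if q ≥ 4 then 20 else 15)
    = 15 + [((4 : Int), (5 : Int)), (6, 5), (8, 3), (10, 2)].foldl
        (fun acc tp => if q ≥ (tp.1 : ℚ) then acc + tp.2 else acc) 0 := by
  simp only [List.foldl]
  push_cast
  split_ifs <;> linarith

lemma pv_time_band (q : ℚ) :
    (if q ≥ 12 then (25 : Int) else if q ≥ 8 then 23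
     else if q ≥ 6 then 20 else if q ≥ 3 then 16 else 12)
    = 12 + [((3 : Int), (4 : Int)), (6, 4), (8, 3), (12, 2)].foldl
        (fun acc tp => if q ≥ (tp.1 : ℚ) then acc + tp.2 else acc) 0 := by
  simp only [List.foldl]
  push_cast
  split_ifs <;> linarith

lemma pv_commit_eq (s : String) :
    (match pvAvgHours? s with
     | none => (22 : Int)
     | some avg =>
       if avg ≥ 10 then 30 else if avg ≥ 8 then 28
       else if avg ≥ 6 then 25 else if avg ≥ 4 then 20 else 15)
    = pvGraded s 4 15 [(4, 5), (6, 5), (8, 3), (10, 2)] 22 := by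
  unfold pvGraded
  rw [pv_avg_hours]
  cases pvAvg? s 4 with
  | none => rfl
  | some q => exact pv_commit_band q

lemma pv_time_eq (s : String) :
    (match pvAvgMonths? s with
     | none => (20 : Int)
     | some avg =>
       if avg ≥ 12 then 25 else if avg ≥ 8 then 23
       else if avg ≥ 6 then 20 else if avg ≥ 3 then 16 else 12)
    = pvGraded s 6 12 [(3, 4), (6, 4), (8, 3), (12, 2)] 20 := by
  unfold pvGraded
  rw [pv_avg_months]
  cases pvAvg? s 6 with
  | none => rfl
  | some q => exact pv_time_band q

lemma pv_edu_eq (pg ug : Bool) :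
    (if pg then (25 : Int) else if ug then 22 else 18)
    = 18 + 4 * pvB2I (ug || pg) + 3 * pvB2I pg := by
  cases pg <;> cases ug <;> rfl

lemma pv_comp_eq (g1 g2 : Bool) :
    (if g1 then (15 : Int) else if g2 then 18 else 17)
    = 17 - 2 * pvB2I g1 + pvB2I (g2 && !g1) := by
  cases g1 <;> cases g2 <;> rfl

-- ===== VERDICT =====
theorem calculate_exam_success_rate_spec : Claim_equal_calculate_exam_success_rate := by
  intro data _
  unfold Spec_calculate_exam_success_rate
  unfold calculate_exam_success_rate calculate_exam_success_rate_alt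
  simp only [pvHas, pv_commit_eq, pv_time_eq,
    pv_edu_eq (pg := _) (ug := _), pv_comp_eq (g1 := _) (g2 := _)]
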